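-- pv_equiv track=rewrite | github.com/AlejandroGilGonzalez/freecodecamp | daily_challenges/march_2026/17_03_2026.py | get_milestone
-- ===== SOURCE A (Python) =====
-- def get_milestone(years:int) -> str:
--
--     # Define the possible anniversary milestones in a dictionary:
--
--     milestones = {
--         1:"Paper",
--         5:"Wood",
--         10:"Tin",
--         25:"Silver",
--         40:"Ruby",
--         50:"Gold",
--         60:"Diamond",
--         70:"Platinum"
--     }
--
--     if years < 1:
--         return "Newlyweds"
--
--     for key,values in milestones.items():
--         if years >= key:
--             result = milestones[key]
--         else:
--             break
--
--     return(result)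
-- ===== SOURCE B (Python) =====
-- def get_milestone(years: int) -> str:
--     # Binary search into a sorted threshold table (bisect_right by hand,
--     # since this module imports nothing), instead of a linear scan-with-break.
--     thresholds = [1, 5, 10, 25, 40, 50, 60, 70]
--     names = ["Paper", "Wood", "Tin", "Silver", "Ruby", "Gold", "Diamond", "Platinum"]
--     lo, hi = 0, len(thresholds)
--     while lo < hi:
--         mid = (lo + hi) // 2
--         if years < thresholds[mid]:
--             hi = mid
--         else:
--             lo = mid + 1
--     idx = lo - 1
--     return "Newlyweds" if idx < 0 else names[idx]
-- ===== Notes on version B (the rewrite author's own statement) =====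
-- stated objective: alternative
-- what changed: Replaces the linear forward scan over dict items with a stop-on-first-smaller break by a hand-written bisect_right binary search over a sorted threshold table indexing a parallel name list.
import Mathlib
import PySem

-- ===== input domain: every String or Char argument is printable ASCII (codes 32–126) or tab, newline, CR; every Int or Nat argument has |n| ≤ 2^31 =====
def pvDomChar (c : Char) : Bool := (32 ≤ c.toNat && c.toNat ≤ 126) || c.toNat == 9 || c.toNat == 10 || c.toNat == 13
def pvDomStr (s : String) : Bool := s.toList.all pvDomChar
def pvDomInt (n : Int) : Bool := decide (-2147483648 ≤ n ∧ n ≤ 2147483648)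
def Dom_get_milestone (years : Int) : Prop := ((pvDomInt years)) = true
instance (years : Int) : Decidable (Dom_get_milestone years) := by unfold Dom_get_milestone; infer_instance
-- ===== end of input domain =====

-- B replaces A's linear scan-with-break over the dict items by a binary search
-- (bisect_right) into a sorted threshold table with a parallel name list (objective: alternative).

-- ===== PORT A =====
-- A's for-loop over milestones.items() with a break; `result` starts unbound
-- (None here); `milestones[key]` for the current item (key, v) is v itself.
def pvLoopA : List (Int × String) → Int → Option String → Option String
  | [], _, result => result
  | (k, v) :: rest, years, result =>
      if years ≥ k then pvLoopA rest years (some v) else result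

def get_milestone (years : Int) : String :=
  -- dict → association list in insertion order (keys distinct)
  let milestones : List (Int × String) :=
    [(1, "Paper"), (5, "Wood"), (10, "Tin"), (25, "Silver"),
     (40, "Ruby"), (50, "Gold"), (60, "Diamond"), (70, "Platinum")]
  if years < 1 then "Newlyweds"
  else
    -- first key is 1 ≤ years here, so the loop always assigns `result`;
    -- the `getD ""` default is unreachable (NameError would need years < 1)
    (pvLoopA milestones years none).getD ""

-- ===== PORT B =====
-- the while-loop of Source B: bisect_right; termination on hi - lo
def pvBisect (a : List Int) (x : Int) (lo hi : Nat) : Nat :=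
  if _h : lo < hi then
    let mid := (lo + hi) / 2
    if x < a.getD mid 0 then pvBisect a x lo mid else pvBisect a x (mid + 1) hi
  else lo
termination_by hi - lo
decreasing_by all_goals omega

def get_milestone_alt (years : Int) : String :=
  let thresholds : List Int := [1, 5, 10, 25, 40, 50, 60, 70]
  let names : List String :=
    ["Paper", "Wood", "Tin", "Silver", "Ruby", "Gold", "Diamond", "Platinum"]
  let lo := pvBisect thresholds years 0 thresholds.length
  let idx : Int := (lo : Int) - 1
  if idx < 0 then "Newlyweds" else names.getD idx.toNat ""

-- ===== PRECONDITION & SPEC =====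
def Spec_get_milestone (years : Int) (out : String) : Prop := out = get_milestone_alt years
instance (years : Int) (out : String) : Decidable (Spec_get_milestone years out) := by unfold Spec_get_milestone; infer_instance

-- ===== CLAIM (what is proved, stated in full; the proofs are below) =====
def Claim_equal_get_milestone : Prop := ∀ (years : Int), Dom_get_milestone years → Spec_get_milestone years (get_milestone years)

-- ===== LEMMAS AND PROOFS =====

-- ===== VERDICT (by name: the statement is the Claim_ definition above) =====
theorem get_milestone_spec : Claim_equal_get_milestone := by
  intro years _
  unfold Spec_get_milestone get_milestone get_milestone_alt
  set_option maxRecDepth 8000 in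
  simp [pvBisect, pvLoopA]
  split_ifs <;> first | rfl | omega
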